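-- pv_equiv track=rewrite | github.com/szlovakm/mesterfeladatok | nt-2-2016-2017-2-2-ritka-szam/ritka.py | ritka
-- ===== SOURCE A (Python) =====
-- def ritka(n):
--     i = 0
--     db = 1
--     while db < n:
--         i += 1
--         if (i & 2*i) == 0:
--             db += 1
--     return i
-- ===== SOURCE B (Python) =====
-- def ritka(n):
--     # n-th number with no two adjacent 1-bits, via Zeckendorf (Fibonacci) digits of n-1
--     m = n - 1
--     if m <= 0:
--         return 0
--     a, b, pos = 1, 2, 0          # a = Fib value worth bit 'pos', b = next one
--     while b <= m:
--         a, b, pos = b, a + b, pos + 1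
--     res = 0
--     for p in range(pos, -1, -1):  # greedy Zeckendorf, emitting binary digits
--         if a <= m:
--             res += 1 << p
--             m -= a
--         a, b = b - a, a
--     return res
-- ===== Notes on version B (the rewrite author's own statement) =====
-- stated objective: faster
-- what changed: A counts up through every integer, testing each for adjacent 1-bits, until the n-th hit; B builds the answer directly in O(log n) by taking the greedy Zeckendorf (Fibonacci) representation of n-1 and reading its digits as binary.
import Mathlib
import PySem

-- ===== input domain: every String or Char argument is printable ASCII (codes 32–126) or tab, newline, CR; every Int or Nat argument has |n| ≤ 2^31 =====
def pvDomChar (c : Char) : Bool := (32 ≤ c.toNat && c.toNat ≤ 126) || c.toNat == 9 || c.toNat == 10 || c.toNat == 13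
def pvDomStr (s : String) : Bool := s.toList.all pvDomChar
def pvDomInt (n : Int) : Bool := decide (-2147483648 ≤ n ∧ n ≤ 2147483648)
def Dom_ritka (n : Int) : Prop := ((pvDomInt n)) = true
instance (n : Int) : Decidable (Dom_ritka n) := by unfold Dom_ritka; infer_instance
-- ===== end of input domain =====

-- B replaces A's one-by-one scan over all numbers (counting those with no adjacent 1-bits)
-- by a direct O(log n) construction: the binary digits of the answer are the greedy
-- Zeckendorf (Fibonacci) digits of n-1.  Objective: faster (asymptotic).

-- ===== PORT A =====
-- A's while-loop; the Nat argument is fuel, a totality guard only: 2^64 steps are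
-- provably enough for every |n| ≤ 2^31 (the loop runs once per candidate i, and the
-- answer is < 2^63 there), so on the claimed domain the guard never fires.
def ritkaLoop (n : Int) : Nat → Int → Int → Int
  | 0, i, _ => i
  | fuel+1, i, db =>
    if db < n then
      if PySem.Int.band (i+1) (2*(i+1)) = 0 then ritkaLoop n fuel (i+1) (db+1)
      else ritkaLoop n fuel (i+1) db
    else i

def ritka (n : Int) : Int := ritkaLoop n (2^64) 0 1

-- ===== PORT B =====
-- climb: Python's `while b <= m: a, b, pos = b, a+b, pos+1`; fuel m.toNat is a totality
-- guard only (b grows past m within that many steps).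
def ritkaClimb (m : Int) : Nat → Int × Int × Int → Int × Int × Int
  | 0, s => s
  | fuel+1, (a, b, pos) => if b ≤ m then ritkaClimb m fuel (b, a+b, pos+1) else (a, b, pos)

-- down: Python's `for p in range(pos, -1, -1)` body; first Nat argument is the number of
-- remaining iterations (pos+1 at the start).
def ritkaDown : Nat → Int → Int → Int → Int → Int → Int
  | 0, _, _, _, _, res => res
  | k+1, p, a, b, m, res =>
    if a ≤ m then ritkaDown k (p-1) (b-a) a (m-a) (res + 1 <<< p.toNat)
    else ritkaDown k (p-1) (b-a) a m res

def ritka_alt (n : Int) : Int :=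
  let m := n - 1
  if m ≤ 0 then 0
  else
    match ritkaClimb m m.toNat (1, 2, 0) with
    | (a, _b, pos) => ritkaDown (pos.toNat + 1) pos a _b m 0

-- ===== PRECONDITION & SPEC =====
def Spec_ritka (n : Int) (out : Int) : Prop := out = ritka_alt n
instance (n : Int) (out : Int) : Decidable (Spec_ritka n out) := by unfold Spec_ritka; infer_instance

-- ===== CLAIM (what is proved, stated in full; the proofs are below) =====
def Claim_equal_ritka : Prop := ∀ (n : Int), Dom_ritka n → Spec_ritka n (ritka n)

-- ===== LEMMAS AND PROOFS =====

-- Mathematical model: fibb k = Fibonacci value worth binary digit k; goZ m p = greedy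
-- Zeckendorf digits of m read as a binary number, scanning positions p, p-1, …, 0;
-- Zk m = the m-th (0-indexed) number with no adjacent 1-bits.
def fibb (k : Nat) : Nat := Nat.fib (k+2)

def goZ : Nat → Nat → Nat
  | m, 0 => if 1 ≤ m then 1 else 0
  | m, p+1 => if fibb (p+1) ≤ m then 2^(p+1) + goZ (m - fibb (p+1)) p else goZ m p

def Zk (m : Nat) : Nat := goZ m m

-- "no adjacent 1-bits", in A's arithmetic form and in testBit form
def SpN (x : Nat) : Prop := x &&& 2*x = 0
def SpT (x : Nat) : Prop := ∀ i, ¬(x.testBit i = true ∧ x.testBit (i+1) = true)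

theorem fibb_add_two (p : Nat) : fibb (p+2) = fibb p + fibb (p+1) := by
  simp [fibb, Nat.fib_add_two]

theorem fibb_mono {p q : Nat} (h : p ≤ q) : fibb p ≤ fibb q := by
  exact Nat.fib_mono (by omega)

theorem lt_fibb (k : Nat) : k < fibb k := by
  induction k with
  | zero => decide
  | succ k ih =>
    have h1 : 1 ≤ Nat.fib (k+1) := (Nat.fib_pos).2 (by omega)
    have : fibb (k+1) = fibb k + Nat.fib (k+1) := by
      simp [fibb, Nat.fib_add_two]; omega
    omega

theorem goZ_stab {m : Nat} : ∀ {q p : Nat}, p ≤ q → m < fibb (p+1) → goZ m q = goZ m p := by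
  intro q
  induction q with
  | zero => intro p hpq _; rw [Nat.le_zero.1 hpq]
  | succ q ih =>
    intro p hpq hm
    rcases Nat.eq_or_lt_of_le hpq with h | h
    · subst h; rfl
    · have hq : p ≤ q := by omega
      have h2 : m < fibb (q+1) := lt_of_lt_of_le hm (fibb_mono (by omega))
      have : goZ m (q+1) = goZ m q := by
        simp only [goZ]; rw [if_neg (by omega)]
      rw [this, ih hq hm]

theorem Zk_eq_goZ {m p : Nat} (h : m < fibb (p+1)) : Zk m = goZ m p := by
  rcases le_total p m with hpm | hmp
  · exact (goZ_stab hpm h).symm ▸ rfl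
  · have hmm : m < fibb (m+1) := lt_of_lt_of_le (lt_fibb m) (fibb_mono (by omega))
    exact (goZ_stab hmp hmm).symm

theorem goZ_lt : ∀ (p m : Nat), m < fibb (p+1) → goZ m p < 2^(p+1) := by
  intro p
  induction p with
  | zero => intro m _; simp only [goZ]; split <;> norm_num
  | succ p ih =>
    intro m hm
    have hm2 : m < fibb (p+2) := hm
    have hadd : fibb (p+2) = fibb p + fibb (p+1) := fibb_add_two p
    have hst : fibb p ≤ fibb (p+1) := fibb_mono (by omega)
    have hpow : (2:Nat)^(p+2) = 2^(p+1) + 2^(p+1) := by ring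
    simp only [goZ]
    split
    · rename_i ht
      have hm' : m - fibb (p+1) < fibb (p+1) := by omega
      have := ih _ hm'
      omega
    · rename_i ht
      have := ih m (by omega)
      omega

theorem goZ_mono : ∀ (p m₁ m₂ : Nat), m₁ < m₂ → m₂ < fibb (p+1) → goZ m₁ p < goZ m₂ p := by
  intro p
  induction p with
  | zero =>
    intro m₁ m₂ h12 h2
    have hf : fibb (0+1) = 2 := by decide
    have : m₁ = 0 ∧ m₂ = 1 := by omega
    obtain ⟨e1, e2⟩ := this; subst e1; subst e2; decide
  | succ p ih =>
    intro m₁ m₂ h12 h2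
    have h2' : m₂ < fibb (p+2) := h2
    have hadd : fibb (p+2) = fibb p + fibb (p+1) := fibb_add_two p
    have hst : fibb p ≤ fibb (p+1) := fibb_mono (by omega)
    simp only [goZ]
    by_cases hc2 : fibb (p+1) ≤ m₂
    · rw [if_pos hc2]
      by_cases hc1 : fibb (p+1) ≤ m₁
      · rw [if_pos hc1]
        have hlt : m₂ - fibb (p+1) < fibb (p+1) := by omega
        have := ih (m₁ - fibb (p+1)) (m₂ - fibb (p+1)) (by omega) hlt
        omega
      · rw [if_neg hc1]
        have := goZ_lt p m₁ (by omega)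
        omega
    · rw [if_neg hc2]
      rw [if_neg (by omega)]
      exact ih m₁ m₂ h12 (by omega)

theorem Zk_mono {m₁ m₂ : Nat} (h : m₁ < m₂) : Zk m₁ < Zk m₂ := by
  have hm2 : m₂ < fibb (m₂+1) := lt_of_lt_of_le (lt_fibb m₂) (fibb_mono (by omega))
  have e1 : Zk m₁ = goZ m₁ m₂ := Zk_eq_goZ (by omega)
  have e2 : Zk m₂ = goZ m₂ m₂ := rfl
  rw [e1, e2]
  exact goZ_mono m₂ m₁ m₂ h hm2

theorem Zk_le_mono {m₁ m₂ : Nat} (h : m₁ ≤ m₂) : Zk m₁ ≤ Zk m₂ := by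
  rcases Nat.eq_or_lt_of_le h with h | h
  · subst h; exact le_refl _
  · exact le_of_lt (Zk_mono h)

theorem tb_two_mul (x i : Nat) : (2*x).testBit (i+1) = x.testBit i := by
  rw [Nat.testBit_succ]; congr 1; omega

theorem tb_top {k r : Nat} (h1 : 2^k ≤ r) (h2 : r < 2^(k+1)) : r.testBit k = true := by
  have hs2 : r - 2^k < 2^k := by
    have : (2:Nat)^(k+1) = 2^k + 2^k := by ring
    omega
  have hsr : r = 2^k + (r - 2^k) := by omega
  rw [hsr, Nat.testBit_two_pow_add_eq, Nat.testBit_lt_two_pow hs2]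
  rfl

theorem SpT_zero : SpT 0 := by intro i h; simp [Nat.zero_testBit] at h

theorem SpT_one : SpT 1 := by
  intro i h
  have : (1:Nat).testBit (i+1) = false :=
    Nat.testBit_lt_two_pow (Nat.one_lt_two_pow_iff.2 (by omega))
  rw [this] at h
  exact absurd h.2 (by simp)

theorem SpT_add (p r : Nat) (hr : r < 2^p) (hs : SpT r) : SpT (2^(p+1) + r) := by
  have hr1 : r < 2^(p+1) := lt_of_lt_of_le hr (Nat.pow_le_pow_right (by norm_num) (by omega))
  have hx : 2^(p+1) + r < 2^(p+2) := by
    have : (2:Nat)^(p+2) = 2^(p+1) + 2^(p+1) := by ring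
    omega
  intro i ⟨h1, h2⟩
  rcases Nat.lt_or_ge i p with hip | hip
  · -- both bits land in r
    rw [Nat.testBit_two_pow_add_gt (by omega) r] at h1
    rw [Nat.testBit_two_pow_add_gt (by omega) r] at h2
    exact hs i ⟨h1, h2⟩
  · rcases Nat.eq_or_lt_of_le hip with hip' | hip'
    · -- i = p : bit p of x is bit p of r, which is false
      have hri : r < 2^i := hip' ▸ hr
      rw [Nat.testBit_two_pow_add_gt (by omega) r, Nat.testBit_lt_two_pow hri] at h1
      exact absurd h1 (by simp)
    · rcases Nat.eq_or_lt_of_le hip' with hip'' | hip''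
      · -- i = p+1 : bit p+2 of x is false
        have : (2^(p+1) + r).testBit (i+1) = false := by
          apply Nat.testBit_lt_two_pow
          calc 2^(p+1) + r < 2^(p+2) := hx
            _ ≤ 2^(i+1) := Nat.pow_le_pow_right (by norm_num) (by omega)
        rw [this] at h2; exact absurd h2 (by simp)
      · -- i ≥ p+2 : bit i of x is false
        have : (2^(p+1) + r).testBit i = false := by
          apply Nat.testBit_lt_two_pow
          calc 2^(p+1) + r < 2^(p+2) := hx
            _ ≤ 2^i := Nat.pow_le_pow_right (by norm_num) (by omega)
        rw [this] at h1; exact absurd h1 (by simp)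

theorem goZ_sparse : ∀ (p m : Nat), m < fibb (p+1) → SpT (goZ m p) := by
  intro p
  induction p with
  | zero =>
    intro m _
    simp only [goZ]
    split
    · exact SpT_one
    · exact SpT_zero
  | succ p ih =>
    intro m hm
    have hm2 : m < fibb (p+2) := hm
    have hadd : fibb (p+2) = fibb p + fibb (p+1) := fibb_add_two p
    have hst : fibb p ≤ fibb (p+1) := fibb_mono (by omega)
    simp only [goZ]
    split
    · rename_i ht
      have hm' : m - fibb (p+1) < fibb p := by omega
      have hsp : SpT (goZ (m - fibb (p+1)) p) := ih _ (by omega)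
      have hlt : goZ (m - fibb (p+1)) p < 2^p := by
        cases p with
        | zero =>
          have h0 : m - fibb (0+1) = 0 := by
            have hf0 : fibb 0 = 1 := by decide
            omega
          rw [h0]; decide
        | succ q =>
          rw [goZ_stab (by omega) (show m - fibb (q+2) < fibb (q+1) from hm')]
          exact goZ_lt q _ hm'
      exact SpT_add p _ hlt hsp
    · rename_i ht
      exact ih m (by omega)

theorem Zk_sparse (m : Nat) : SpT (Zk m) := by
  exact goZ_sparse m m (lt_of_lt_of_le (lt_fibb m) (fibb_mono (by omega)))

theorem sparse_surj : ∀ (p x : Nat), x < 2^p → SpT x → ∃ m, m < fibb p ∧ Zk m = x := by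
  intro p
  induction p using Nat.strong_induction_on with
  | _ p ih =>
    match p with
    | 0 =>
      intro x hx _
      have : x = 0 := by simpa using hx
      exact ⟨0, by decide, by rw [this]; decide⟩
    | 1 =>
      intro x hx hs
      interval_cases x
      · exact ⟨0, by decide, by decide⟩
      · exact ⟨1, by decide, by decide⟩
    | (q+2) =>
      intro x hx hs
      by_cases h1 : x < 2^(q+1)
      · obtain ⟨m, hm, hz⟩ := ih (q+1) (by omega) x h1 hs
        exact ⟨m, lt_of_lt_of_le hm (fibb_mono (by omega)), hz⟩
      · push_neg at h1
        have hrlt : x - 2^(q+1) < 2^(q+1) := by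
          have : (2:Nat)^(q+2) = 2^(q+1) + 2^(q+1) := by ring
          omega
        set r := x - 2^(q+1) with hrdef
        have hxr : x = 2^(q+1) + r := by omega
        have hbit_top : x.testBit (q+1) = true := by
          rw [hxr, Nat.testBit_two_pow_add_eq, Nat.testBit_lt_two_pow hrlt]; rfl
        have hbq : x.testBit q = false := by
          cases hq : x.testBit q with
          | false => rfl
          | true => exact absurd ⟨hq, hbit_top⟩ (hs q)
        have hrq : r.testBit q = false := by
          have h := Nat.testBit_two_pow_add_gt (show q < q+1 by omega) r
          rw [← hxr] at h
          rw [← h]; exact hbq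
        have hrlt2 : r < 2^q := by
          by_contra hcon
          push_neg at hcon
          rw [tb_top hcon hrlt] at hrq
          exact absurd hrq (by simp)
        have hrs : SpT r := by
          intro i hi
          by_cases hiq : i + 1 ≤ q
          · apply hs i
            constructor
            · rw [hxr, Nat.testBit_two_pow_add_gt (by omega) r]; exact hi.1
            · rw [hxr, Nat.testBit_two_pow_add_gt (by omega) r]; exact hi.2
          · have : r.testBit (i+1) = false :=
              Nat.testBit_lt_two_pow
                (lt_of_lt_of_le hrlt2 (Nat.pow_le_pow_right (by norm_num) (by omega)))
            rw [this] at hi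
            exact absurd hi.2 (by simp)
        obtain ⟨m', hm', hz'⟩ := ih q (by omega) r hrlt2 hrs
        have hadd : fibb (q+2) = fibb q + fibb (q+1) := fibb_add_two q
        have hmf : fibb (q+1) + m' < fibb (q+2) := by omega
        refine ⟨fibb (q+1) + m', hmf, ?_⟩
        rw [Zk_eq_goZ (show fibb (q+1) + m' < fibb (q+1+1) from hmf)]
        simp only [goZ]
        rw [if_pos (by omega)]
        have he : fibb (q+1) + m' - fibb (q+1) = m' := by omega
        rw [he]
        have hgz : goZ m' q = Zk m' :=
          (Zk_eq_goZ (lt_of_lt_of_le hm' (fibb_mono (by omega)))).symm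
        rw [hgz, hz', ← hxr]

theorem SpN_iff_SpT (x : Nat) : SpN x ↔ SpT x := by
  constructor
  · intro h i hi
    have hz : (x &&& 2*x).testBit (i+1) = false := by
      rw [h]; exact Nat.zero_testBit _
    rw [Nat.testBit_land, tb_two_mul, hi.1, hi.2] at hz
    exact absurd hz (by simp)
  · intro hs
    apply Nat.eq_of_testBit_eq
    intro j
    rw [Nat.testBit_land, Nat.zero_testBit]
    cases j with
    | zero =>
      have : (2*x).testBit 0 = false := by rw [Nat.testBit_zero]; simp
      rw [this]; simp
    | succ j =>
      rw [tb_two_mul]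
      cases ha : x.testBit (j+1) with
      | false => simp
      | true =>
        cases hb : x.testBit j with
        | false => simp
        | true => exact absurd ⟨hb, ha⟩ (hs j)

theorem loopA_exit {n : Int} (fuel : Nat) (i db : Int) (h : ¬ db < n) :
    ritkaLoop n fuel i db = i := by
  cases fuel <;> simp [ritkaLoop, h]

theorem loopA_inv : ∀ (fuel : Nat) (N db i : Nat), 1 ≤ db → db < N →
    Zk (db - 1) ≤ i → i < Zk db → Zk (N-1) - i ≤ fuel →
    ritkaLoop (N : Int) fuel (i : Int) (db : Int) = (Zk (N-1) : Int) := by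
  intro fuel
  induction fuel with
  | zero =>
    intro N db i h1 h2 h3 h4 h5
    exfalso
    have : Zk db ≤ Zk (N-1) := Zk_le_mono (by omega)
    omega
  | succ fuel ih =>
    intro N db i h1 h2 h3 h4 h5
    have hdbN : (db:Int) < (N:Int) := by exact_mod_cast h2
    simp only [ritkaLoop]
    rw [if_pos hdbN]
    have hcast1 : (i:Int) + 1 = ((i+1 : Nat) : Int) := by push_cast; ring
    have hband : PySem.Int.band ((i:Int)+1) (2*((i:Int)+1)) = (((i+1) &&& (2*(i+1)) : Nat) : Int) := by
      rw [hcast1, show (2 : Int) * ((i+1 : Nat):Int) = ((2*(i+1) : Nat) : Int) by push_cast; ring]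
      exact PySem.Int.band_natCast _ _
    by_cases hs : (i+1) &&& (2*(i+1)) = 0
    · -- i+1 has no adjacent 1-bits: it is the next counted number, i.e. Zk db
      have hcond : PySem.Int.band ((i:Int)+1) (2*((i:Int)+1)) = 0 := by
        rw [hband, hs]; rfl
      rw [if_pos hcond]
      have hspt : SpT (i+1) := (SpN_iff_SpT _).1 hs
      obtain ⟨m, _, hzm⟩ := sparse_surj (i+1) (i+1) Nat.lt_two_pow_self hspt
      have hmlt : db - 1 < m := by
        by_contra hc
        push_neg at hc
        have := Zk_le_mono hc
        omega
      have hmle : m ≤ db := by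
        by_contra hc
        push_neg at hc
        have := Zk_mono (show db < m by omega)
        omega
      have hieq : i + 1 = Zk db := by
        have hm : m = db := by omega
        rw [← hm, hzm]
      by_cases hn : db + 1 < N
      · have hc2 : (db:Int) + 1 = ((db+1 : Nat) : Int) := by push_cast; ring
        rw [hcast1, hc2]
        apply ih N (db+1) (i+1) (by omega) hn
        · have : db + 1 - 1 = db := by omega
          rw [this, ← hieq]
        · rw [hieq]; exact Zk_mono (by omega)
        · omega
      · have hdbn : db + 1 = N := by omega
        have hc3 : ((db:Int)) + 1 = (N:Int) := by exact_mod_cast hdbn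
        rw [hcast1, hc3, loopA_exit fuel _ _ (by omega)]
        have hd : db = N - 1 := by omega
        rw [← hd, ← hieq]
    · have hcond : ¬ PySem.Int.band ((i:Int)+1) (2*((i:Int)+1)) = 0 := by
        rw [hband]
        intro hz
        exact hs (by exact_mod_cast hz)
      rw [if_neg hcond]
      have hne : i + 1 ≠ Zk db := by
        intro he
        apply hs
        have hsp := Zk_sparse db
        rw [← he] at hsp
        exact (SpN_iff_SpT _).2 hsp
      rw [hcast1]
      exact ih N db (i+1) h1 h2 (by omega) (by omega) (by omega)

theorem Zk_fuel_bound {m : Nat} (h : m ≤ 2^31) : Zk m < 2^64 := by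
  have h63 : (2147483648 : Nat) < fibb (62+1) := by decide
  have hm63 : m < fibb (62+1) := by
    have : (2:Nat)^31 = 2147483648 := by norm_num
    omega
  rw [Zk_eq_goZ hm63]
  have := goZ_lt 62 m hm63
  calc goZ m 62 < 2^63 := this
    _ < 2^64 := by norm_num

theorem climb_spec : ∀ (fuel P m : Nat), m ≤ fuel + P →
    ∃ P', ritkaClimb (m:Int) fuel ((fibb P : Int), (fibb (P+1) : Int), (P:Int))
          = ((fibb P' : Int), (fibb (P'+1) : Int), (P':Int)) ∧ m < fibb (P'+1) := by
  intro fuel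
  induction fuel with
  | zero =>
    intro P m hm
    refine ⟨P, rfl, ?_⟩
    have h1 := lt_fibb P
    have h2 := fibb_mono (show P ≤ P+1 by omega)
    omega
  | succ fuel ih =>
    intro P m hm
    simp only [ritkaClimb]
    by_cases hc : fibb (P+1) ≤ m
    · rw [if_pos (show ((fibb (P+1) : Nat):Int) ≤ (m:Int) by exact_mod_cast hc)]
      have e1 : ((fibb P : Nat) : Int) + ((fibb (P+1) : Nat) : Int) = ((fibb (P+2) : Nat) : Int) := by
        rw [fibb_add_two]; push_cast; ring
      have e2 : ((P:Nat):Int) + 1 = ((P+1 : Nat):Int) := by push_cast; ring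
      rw [e1, e2]
      exact ih (P+1) m (by omega)
    · rw [if_neg (show ¬ ((fibb (P+1) : Nat):Int) ≤ (m:Int) by exact_mod_cast hc)]
      exact ⟨P, rfl, by omega⟩

theorem down_spec : ∀ (p m : Nat) (res : Int),
    ritkaDown (p+1) (p:Int) (fibb p : Int) (fibb (p+1) : Int) (m:Int) res = res + (goZ m p : Int) := by
  intro p
  induction p with
  | zero =>
    intro m res
    have hf0 : fibb 0 = 1 := by decide
    have hf1 : fibb (0+1) = 2 := by decide
    rw [hf0, hf1, ritkaDown]
    by_cases hc : (1:Nat) ≤ m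
    · rw [if_pos (show ((1:Nat):Int) ≤ (m:Int) by exact_mod_cast hc), ritkaDown]
      have hg : goZ m 0 = 1 := by simp [goZ, hc]
      rw [hg]
      simp
    · rw [if_neg (show ¬ ((1:Nat):Int) ≤ (m:Int) by exact_mod_cast hc), ritkaDown]
      have hg : goZ m 0 = 0 := by simp [goZ, hc]
      rw [hg]
      simp
  | succ p ih =>
    intro m res
    have hadd : fibb (p+2) = fibb p + fibb (p+1) := fibb_add_two p
    rw [ritkaDown]
    have e0 : ((p+1:Nat):Int) - 1 = (p:Int) := by push_cast; ring
    have e1 : ((fibb (p+2):Nat):Int) - ((fibb (p+1):Nat):Int) = ((fibb p : Nat):Int) := by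
      rw [hadd]; push_cast; ring
    have e3 : ((1 <<< ((((p+1):Nat):Int)).toNat : Nat) : Int) = ((2^(p+1) : Nat) : Int) := by
      have ht : ((((p+1):Nat):Int)).toNat = p+1 := by simp
      rw [ht, Nat.one_shiftLeft]
    by_cases hc : fibb (p+1) ≤ m
    · rw [if_pos (show ((fibb (p+1):Nat):Int) ≤ (m:Int) by exact_mod_cast hc)]
      have e2 : (m:Int) - ((fibb (p+1):Nat):Int) = ((m - fibb (p+1) : Nat) : Int) := by omega
      rw [e0, e1, e2, e3, ih (m - fibb (p+1)) (res + ((2^(p+1):Nat):Int))]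
      have hg : goZ m (p+1) = 2^(p+1) + goZ (m - fibb (p+1)) p := by simp [goZ, hc]
      rw [hg]; push_cast; ring
    · rw [if_neg (show ¬ ((fibb (p+1):Nat):Int) ≤ (m:Int) by exact_mod_cast hc)]
      rw [e0, e1, ih m res]
      have hg : goZ m (p+1) = goZ m p := by simp [goZ, hc]
      rw [hg]

theorem alt_eq {n : Int} (h : 2 ≤ n) : ritka_alt n = (Zk ((n-1).toNat) : Int) := by
  have hn1 : (((n-1).toNat : Nat) : Int) = n - 1 := by omega
  obtain ⟨P', hcl, hP'⟩ := climb_spec ((n-1).toNat) 0 ((n-1).toNat) (by omega)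
  unfold ritka_alt
  rw [if_neg (by omega : ¬ n - 1 ≤ 0)]
  have hstart : ((1:Int), (2:Int), (0:Int)) = ((fibb 0 : Int), (fibb (0+1) : Int), ((0:Nat):Int)) := by
    decide
  have hclimb : ritkaClimb (n-1) ((n-1).toNat) ((1:Int), (2:Int), (0:Int))
      = ((fibb P' : Int), (fibb (P'+1) : Int), (P':Int)) := by
    rw [hstart, ← hn1]
    simpa using hcl
  rw [hclimb]
  show ritkaDown ((((P':Nat):Int)).toNat + 1) ((P':Nat):Int) ((fibb P' : Nat):Int)
      ((fibb (P'+1) : Nat):Int) (n-1) 0 = ((Zk ((n-1).toNat) : Nat) : Int)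
  have ht : ((P':Nat):Int).toNat = P' := by simp
  rw [ht, ← hn1, down_spec P' ((n-1).toNat) 0]
  have htn : ((((n - 1).toNat : Nat) : Int)).toNat = (n-1).toNat := by omega
  rw [htn, Zk_eq_goZ hP']
  simp

-- ===== VERDICT (by name: the statement is the Claim_ definition above) =====
theorem ritka_spec : Claim_equal_ritka := by
  intro n hdom
  unfold Spec_ritka
  by_cases h1 : n ≤ 1
  · have ha : ritka n = 0 := by
      unfold ritka
      exact loopA_exit _ _ _ (by omega)
    have hb : ritka_alt n = 0 := by
      unfold ritka_alt
      rw [if_pos (by omega : n - 1 ≤ 0)]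
    rw [ha, hb]
  · push_neg at h1
    have hdom' : n ≤ 2147483648 := (of_decide_eq_true hdom).2
    have hn : ((n.toNat : Nat):Int) = n := by omega
    have hN2 : 2 ≤ n.toNat := by omega
    have hNb : n.toNat - 1 ≤ 2^31 := by
      have : (2:Nat)^31 = 2147483648 := by norm_num
      omega
    have ha : ritka n = (Zk (n.toNat - 1) : Int) := by
      unfold ritka
      conv_lhs => rw [← hn]
      have hfuel : Zk (n.toNat - 1) - 0 ≤ 2^64 := by
        have := Zk_fuel_bound hNb
        omega
      have := loopA_inv (2^64) n.toNat 1 0 (le_refl 1) (by omega)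
        (by rw [show (1:Nat) - 1 = 0 by omega]; decide) (by decide) hfuel
      simpa using this
    have hb : ritka_alt n = (Zk ((n-1).toNat) : Int) := alt_eq (by omega)
    rw [ha, hb]
    have : (n-1).toNat = n.toNat - 1 := by omega
    rw [this]
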